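-- pv_equiv track=rewrite | github.com/alu82/adventofcode-python | 2019/21/day21.py | getCurrentViewGrid
-- ===== SOURCE A (Python) =====
-- NEWLINE = 10
--
-- def getCurrentViewGrid(view):
--     panel = {}
--     col = 0
--     row = 0
--     for field in view:
--         if field == NEWLINE:
--             row += 1
--             col = 0
--         else:
--             panel[(col, row)] = field
--             col += 1
--     return panel
-- ===== SOURCE B (Python) =====
-- NEWLINE = 10
--
-- def getCurrentViewGrid(view):
--     lines = []
--     cur = []
--     for field in view:
--         if field == NEWLINE:
--             lines.append(cur)
--             cur = []
--         else:
--             cur.append(field)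
--     lines.append(cur)
--     return {(col, row): field
--             for row, line in enumerate(lines)
--             for col, field in enumerate(line)}
-- ===== Notes on version B (the rewrite author's own statement) =====
-- stated objective: alternative
-- what changed: A walks the stream once with manual col/row counters inserting into the dict as it goes; B first splits the stream into a list of rows at each NEWLINE (trailing newline yields a trailing empty row) and then builds the dict with a nested-enumerate comprehension over rows and columns.
import Mathlib
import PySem

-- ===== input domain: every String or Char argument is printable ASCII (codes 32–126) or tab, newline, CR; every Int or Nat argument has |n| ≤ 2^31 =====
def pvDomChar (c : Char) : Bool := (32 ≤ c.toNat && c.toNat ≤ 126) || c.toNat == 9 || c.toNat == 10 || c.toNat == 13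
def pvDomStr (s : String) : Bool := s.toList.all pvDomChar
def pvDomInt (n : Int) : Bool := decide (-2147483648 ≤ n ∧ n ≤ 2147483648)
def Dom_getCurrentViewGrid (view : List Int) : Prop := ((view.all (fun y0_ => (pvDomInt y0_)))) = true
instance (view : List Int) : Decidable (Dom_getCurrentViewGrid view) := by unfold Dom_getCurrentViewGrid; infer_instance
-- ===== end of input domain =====

-- B replaces A's single loop with manual col/row counters by a split-into-lines pass
-- followed by a nested-enumerate dict comprehension (objective: alternative decomposition).

-- ===== PORT A =====
-- the for-loop of A over (panel, col, row); dict key is the (col, row) tuple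
def pvLoopA (panel : PySem.Dict (Int × Int) Int) (col row : Int) (view : List Int) :
    PySem.Dict (Int × Int) Int :=
  match view with
  | [] => panel
  | field :: rest =>
    if field = 10 then pvLoopA panel 0 (row + 1) rest
    else pvLoopA (panel.insert (col, row) field) (col + 1) row rest

def getCurrentViewGrid (view : List Int) : List (Int × Int × Int) :=
  -- items of the returned dict, each ((col,row),field) flattened to (col,row,field)
  (pvLoopA PySem.Dict.empty 0 0 view).items.map (fun p => (p.1.1, p.1.2, p.2))

-- ===== PORT B =====
-- Source B's first loop: split the stream on NEWLINE into lines (trailing accumulator appended)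
def pvSplit (view : List Int) : List (List Int) :=
  match view with
  | [] => [[]]
  | field :: rest =>
    if field = 10 then [] :: pvSplit rest
    else
      match pvSplit rest with
      | [] => [[field]]   -- unreachable: pvSplit is never []
      | l :: ls => (field :: l) :: ls

def getCurrentViewGrid_alt (view : List Int) : List (Int × Int × Int) :=
  -- Source B's dict comprehension with nested enumerate
  (PySem.List.enumerate (pvSplit view) 0).flatMap (fun rl =>
    (PySem.List.enumerate rl.2 0).map (fun cf => (cf.1, rl.1, cf.2)))

-- ===== PRECONDITION & SPEC =====
def Spec_getCurrentViewGrid (view : List Int) (out : List (Int × Int × Int)) : Prop := out = getCurrentViewGrid_alt view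
instance (view : List Int) (out : List (Int × Int × Int)) : Decidable (Spec_getCurrentViewGrid view out) := by unfold Spec_getCurrentViewGrid; infer_instance

-- ===== CLAIM (what is proved, stated in full; the proofs are below) =====
def Claim_equal_getCurrentViewGrid : Prop := ∀ (view : List Int), Dom_getCurrentViewGrid view → Spec_getCurrentViewGrid view (getCurrentViewGrid view)

-- ===== LEMMAS AND PROOFS =====

-- the flat triples A's loop appends, as a direct recursion over the stream
def pvBody (view : List Int) (col row : Int) : List (Int × Int × Int) :=
  match view with
  | [] => []
  | field :: rest =>
    if field = 10 then pvBody rest 0 (row + 1)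
    else (col, row, field) :: pvBody rest (col + 1) row

-- B's nested pass, row index made explicit
def pvRows (lines : List (List Int)) (row : Int) : List (Int × Int × Int) :=
  match lines with
  | [] => []
  | l :: ls => (PySem.List.enumerate l 0).map (fun cf => (cf.1, row, cf.2)) ++ pvRows ls (row + 1)

def pvInv (panel : PySem.Dict (Int × Int) Int) (col row : Int) : Prop :=
  ∀ c r : Int, panel.contains (c, r) = true → r < row ∨ (r = row ∧ c < col)

theorem pvLoopA_items (view : List Int) :
    ∀ (panel : PySem.Dict (Int × Int) Int) (col row : Int), pvInv panel col row →
    (pvLoopA panel col row view).items.map (fun p => (p.1.1, p.1.2, p.2)) =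
      panel.items.map (fun p => (p.1.1, p.1.2, p.2)) ++ pvBody view col row := by
  induction view with
  | nil => intro panel col row _; simp [pvLoopA, pvBody]
  | cons field rest ih =>
    intro panel col row hinv
    by_cases h : field = 10
    · simp only [pvLoopA, pvBody, h, if_true]
      exact ih panel 0 (row + 1) (fun c r hc => by rcases hinv c r hc with h1 | ⟨h1, _⟩ <;> omega)
    · simp only [pvLoopA, pvBody, if_neg h]
      have hfresh : panel.contains (col, row) = false := by
        cases hc : panel.contains (col, row) with
        | false => rfl
        | true => rcases hinv col row hc with h1 | ⟨_, h2⟩ <;> omega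
      have hinv' : pvInv (panel.insert (col, row) field) (col + 1) row := by
        intro c r hc
        rw [PySem.Dict.contains_insert] at hc
        rcases Bool.or_eq_true_iff.mp hc with hc | hc
        · have h' : c = col ∧ r = row := by simpa using eq_of_beq hc
          rcases h' with ⟨h1, h2⟩; omega
        · rcases hinv c r hc with h1 | ⟨h1, h2⟩
          · left; exact h1
          · right; exact ⟨h1, by omega⟩
      rw [ih _ _ _ hinv', PySem.Dict.items_insert_of_not_contains _ _ hfresh]
      simp

theorem pvSplit_ne_nil (view : List Int) : pvSplit view ≠ [] := by
  cases view with
  | nil => simp [pvSplit]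
  | cons f rest =>
    simp only [pvSplit]
    split
    · simp
    · cases pvSplit rest <;> simp

theorem pvBody_eq_rows (view : List Int) : ∀ (col row : Int),
    pvBody view col row =
      match pvSplit view with
      | [] => []
      | l :: ls => (PySem.List.enumerate l col).map (fun cf => (cf.1, row, cf.2)) ++ pvRows ls (row + 1) := by
  induction view with
  | nil => intro col row; simp [pvBody, pvSplit, pvRows, PySem.List.enumerate]
  | cons field rest ih =>
    intro col row
    by_cases h : field = 10
    · simp only [pvBody, pvSplit, h, if_true]
      rw [ih 0 (row + 1)]
      cases hs : pvSplit rest with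
      | nil => exact absurd hs (pvSplit_ne_nil rest)
      | cons l ls => simp [pvRows]
    · simp only [pvBody, pvSplit, if_neg h]
      rw [ih (col + 1) row]
      cases hs : pvSplit rest with
      | nil => exact absurd hs (pvSplit_ne_nil rest)
      | cons l ls => simp [PySem.List.enumerate_cons]

theorem pvRows_eq_flatMap (lines : List (List Int)) : ∀ (row : Int),
    (PySem.List.enumerate lines row).flatMap (fun rl =>
      (PySem.List.enumerate rl.2 0).map (fun cf => (cf.1, rl.1, cf.2))) = pvRows lines row := by
  induction lines with
  | nil => intro row; simp [pvRows, PySem.List.enumerate]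
  | cons l ls ih => intro row; simp [pvRows, PySem.List.enumerate_cons, ih]

-- ===== VERDICT (by name: the statement is the Claim_ definition above) =====
theorem getCurrentViewGrid_spec : Claim_equal_getCurrentViewGrid := by
  intro view _
  show getCurrentViewGrid view = getCurrentViewGrid_alt view
  unfold getCurrentViewGrid getCurrentViewGrid_alt
  rw [pvLoopA_items view PySem.Dict.empty 0 0 (by intro c r hc; simp [PySem.Dict.contains, PySem.Dict.empty] at hc),
      pvRows_eq_flatMap, pvBody_eq_rows view 0 0]
  cases hs : pvSplit view with
  | nil => exact absurd hs (pvSplit_ne_nil view)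
  | cons l ls => simp [pvRows, PySem.Dict.empty]
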